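-- pv_equiv track=rewrite | github.com/iriveraf01/Python-2526 | EC/Tema3/Practica_examen/ej7.py | dar_pista
-- ===== SOURCE A (Python) =====
-- def dar_pista(palabra_objetivo, letras_introducidas):
--     letra_elegida = None
--     repeticiones_mas_bajas = None
--
--     for letra in palabra_objetivo.lower():
--         if letra not in letras_introducidas:
--
--             repeticiones = palabra_objetivo.count(letra)
--
--             if repeticiones_mas_bajas is None or repeticiones < repeticiones_mas_bajas:
--                 letra_elegida = letra
--                 repeticiones_mas_bajas = repeticiones
--
--     return letra_elegida
-- ===== SOURCE B (Python) =====
-- def dar_pista(palabra_objetivo, letras_introducidas):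
--     grupos = {}
--     for letra in palabra_objetivo.lower():
--         if letra not in letras_introducidas:
--             grupos.setdefault(palabra_objetivo.count(letra), []).append(letra)
--     if not grupos:
--         return None
--     return grupos[min(grupos)][0]
-- ===== Notes on version B (the rewrite author's own statement) =====
-- stated objective: alternative
-- what changed: Replaces the interleaved running-min scan with building a count->letters bucket table in one pass, then returning the first letter of the minimum-count bucket.
import Mathlib
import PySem

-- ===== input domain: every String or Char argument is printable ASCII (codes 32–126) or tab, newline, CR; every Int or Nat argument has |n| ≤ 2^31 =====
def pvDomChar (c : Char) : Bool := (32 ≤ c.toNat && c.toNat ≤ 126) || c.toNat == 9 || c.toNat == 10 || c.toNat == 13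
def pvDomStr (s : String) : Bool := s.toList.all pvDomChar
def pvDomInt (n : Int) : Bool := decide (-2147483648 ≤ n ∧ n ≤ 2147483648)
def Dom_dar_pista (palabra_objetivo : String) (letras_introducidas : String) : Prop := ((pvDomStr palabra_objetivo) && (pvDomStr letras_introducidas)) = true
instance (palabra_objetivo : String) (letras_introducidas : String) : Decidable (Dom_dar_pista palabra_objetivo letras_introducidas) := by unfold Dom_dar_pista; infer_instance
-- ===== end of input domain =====

-- B replaces A's interleaved running-min scan by building a count→letters bucket table in one
-- pass and returning the first letter of the minimum-count bucket (objective: alternative).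

-- ===== PORT A =====
def dar_pista (palabra_objetivo : String) (letras_introducidas : String) : Option String :=
  let st := (PySem.Chars.lower palabra_objetivo.toList).foldl
    (fun (st : Option Char × Option Int) letra =>
      if PySem.Chars.isIn [letra] letras_introducidas.toList then st
      else
        let repeticiones : Int := (PySem.Chars.count palabra_objetivo.toList [letra] : Int)
        match st.2 with
        | none => (some letra, some repeticiones)
        | some m => if repeticiones < m then (some letra, some repeticiones) else st)
    (none, none)
  st.1.map (fun c => String.ofList [c])

-- ===== PORT B =====
def dar_pista_alt (palabra_objetivo : String) (letras_introducidas : String) : Option String :=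
  let grupos := (PySem.Chars.lower palabra_objetivo.toList).foldl
    (fun (d : PySem.Dict Int (List Char)) letra =>
      if PySem.Chars.isIn [letra] letras_introducidas.toList then d
      else d.modify ((PySem.Chars.count palabra_objetivo.toList [letra] : Int)) []
             (fun xs => xs ++ [letra]))
    PySem.Dict.empty
  match PySem.List.min? grupos.keys (fun k => k) with
  | none => none
  | some k => (PySem.List.pyGet? (grupos.getD k []) 0).map (fun c => String.ofList [c])

-- ===== PRECONDITION & SPEC =====
def Spec_dar_pista (palabra_objetivo : String) (letras_introducidas : String) (out : Option String) : Prop := out = dar_pista_alt palabra_objetivo letras_introducidas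
instance (palabra_objetivo : String) (letras_introducidas : String) (out : Option String) : Decidable (Spec_dar_pista palabra_objetivo letras_introducidas out) := by unfold Spec_dar_pista; infer_instance

-- ===== CLAIM (what is proved, stated in full; the proofs are below) =====
def Claim_equal_dar_pista : Prop := ∀ (palabra_objetivo : String) (letras_introducidas : String), Dom_dar_pista palabra_objetivo letras_introducidas → Spec_dar_pista palabra_objetivo letras_introducidas (dar_pista palabra_objetivo letras_introducidas)

-- ===== LEMMAS AND PROOFS =====

-- the occurrence count of the (lowered) letter c in the original word, as both programs compute it
def pvF (p : String) (c : Char) : Int := (PySem.Chars.count p.toList [c] : Int)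

-- the candidate letters: lowered word filtered to those not occurring in the guessed string
def pvCands (p l : String) : List Char :=
  (PySem.Chars.lower p.toList).filter (fun c => !(PySem.Chars.isIn [c] l.toList))

-- A's running-min step on letters only
def pvG (p : String) (b c : Char) : Char := if pvF p c < pvF p b then c else b

-- A's pair state (letter, count) carries count = pvF of the letter
theorem pvPair (p : String) : ∀ (t : List Char) (a : Char),
    t.foldl (fun (st : Option Char × Option Int) letra =>
        match st.2 with
        | none => (some letra, some (pvF p letra))
        | some m => if pvF p letra < m then (some letra, some (pvF p letra)) else st)
      (some a, some (pvF p a))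
    = (some (t.foldl (pvG p) a), some (pvF p (t.foldl (pvG p) a))) := by
  intro t
  induction t with
  | nil => intro a; rfl
  | cons x t ih =>
    intro a
    simp only [List.foldl_cons]
    by_cases h : pvF p x < pvF p a
    · simp only [pvG, if_pos h, ih]
    · simp only [pvG, if_neg h, ih]

-- the running min is the first letter attaining the minimal count
theorem pvFoldlG_min (p : String) : ∀ (t : List Char) (a : Char),
    (∀ c ∈ a :: t, pvF p (t.foldl (pvG p) a) ≤ pvF p c) ∧
    ((a :: t).filter (fun c => pvF p c == pvF p (t.foldl (pvG p) a))).head?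
      = some (t.foldl (pvG p) a) := by
  intro t
  induction t with
  | nil => intro a; simp
  | cons x t ih =>
    intro a
    simp only [List.foldl_cons]
    obtain ⟨ihmin, ihhead⟩ := ih (pvG p a x)
    set r := t.foldl (pvG p) (pvG p a x) with hr
    have hra : pvF p r ≤ pvF p (pvG p a x) := ihmin _ (List.mem_cons_self ..)
    have hga : pvF p (pvG p a x) ≤ pvF p a := by unfold pvG; split <;> omega
    have hgx : pvF p (pvG p a x) ≤ pvF p x := by unfold pvG; split <;> omega
    constructor
    · intro c hc
      rcases List.mem_cons.1 hc with rfl | hc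
      · omega
      rcases List.mem_cons.1 hc with rfl | hc
      · omega
      · exact ihmin _ (List.mem_cons_of_mem _ hc)
    · by_cases hx : pvF p x < pvF p a
      · have hane : (pvF p a == pvF p r) = false := by
          simp only [pvG, if_pos hx] at hra ⊢
          simp only [beq_eq_false_iff_ne, ne_eq]; omega
        have hgax : pvG p a x = x := by simp [pvG, hx]
        rw [List.filter_cons_of_neg (by simp [hane])]
        rw [hgax] at ihhead
        exact ihhead
      · have hg : pvG p a x = a := by simp [pvG, hx]
        rw [hg] at hra ihhead
        by_cases hxr : pvF p x = pvF p r
        · have har : pvF p a = pvF p r := by omega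
          have hreq : r = a := by
            rw [List.filter_cons_of_pos (by simp [har])] at ihhead
            simpa using ihhead.symm
          rw [List.filter_cons_of_pos (by simp [har])]
          simp [hreq]
        · rw [List.filter_cons] at ihhead ⊢
          rw [List.filter_cons_of_neg (by simp [hxr])]
          exact ihhead

-- A's guarded fold over the lowered word = the pure fold over the candidate list
theorem pvA_as_cands (p l : String) :
    dar_pista p l = (match pvCands p l with
      | [] => none
      | c :: t => some (String.ofList [t.foldl (pvG p) c])) := by
  unfold dar_pista
  have hfold : (PySem.Chars.lower p.toList).foldl
      (fun (st : Option Char × Option Int) letra =>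
        if PySem.Chars.isIn [letra] l.toList then st
        else
          let repeticiones : Int := (PySem.Chars.count p.toList [letra] : Int)
          match st.2 with
          | none => (some letra, some repeticiones)
          | some m => if repeticiones < m then (some letra, some repeticiones) else st)
      (none, none)
    = (pvCands p l).foldl
      (fun (st : Option Char × Option Int) letra =>
        match st.2 with
        | none => (some letra, some (pvF p letra))
        | some m => if pvF p letra < m then (some letra, some (pvF p letra)) else st)
      (none, none) := by
    rw [pvCands, List.foldl_filter]
    congr 1
    funext st c
    cases h : PySem.Chars.isIn [c] l.toList
    · simp [pvF]
    · simp
  rw [hfold]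
  cases hc : pvCands p l with
  | nil => rfl
  | cons c t =>
    simp only [List.foldl_cons]
    rw [pvPair]
    rfl

-- Python list indexing [0] is head?
theorem pvHeadGet (xs : List Char) : PySem.List.pyGet? xs 0 = xs.head? := by
  cases xs <;> simp [PySem.List.pyGet?, PySem.List.pyIdx?]

-- B's guarded dict-building fold over the lowered word = the pure fold over the candidate list
theorem pvB_fold (p l : String) :
    (PySem.Chars.lower p.toList).foldl
      (fun (d : PySem.Dict Int (List Char)) letra =>
        if PySem.Chars.isIn [letra] l.toList then d
        else d.modify ((PySem.Chars.count p.toList [letra] : Int)) [] (fun xs => xs ++ [letra]))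
      PySem.Dict.empty
    = (pvCands p l).foldl
      (fun (d : PySem.Dict Int (List Char)) letra =>
        d.modify (pvF p letra) [] (fun xs => xs ++ [letra])) PySem.Dict.empty := by
  rw [pvCands, List.foldl_filter]
  congr 1
  funext d c
  cases h : PySem.Chars.isIn [c] l.toList
  · simp [pvF]
  · simp

-- B's dict keys are the distinct candidate counts in first-appearance order
theorem pvB_keys (p l : String) :
    ((pvCands p l).foldl
      (fun (d : PySem.Dict Int (List Char)) letra =>
        d.modify (pvF p letra) [] (fun xs => xs ++ [letra])) PySem.Dict.empty).keys
    = PySem.Set.ofList ((pvCands p l).map (pvF p)) := by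
  rw [PySem.Dict.keys_foldl_modify_key (pvCands p l) (pvF p) [] (fun _ letra xs => xs ++ [letra])]
  simp [PySem.Set.update_nil_left]

-- B's bucket for count k is the sublist of candidates with that count, in scan order
theorem pvB_getD (p l : String) (k : Int) :
    ((pvCands p l).foldl
      (fun (d : PySem.Dict Int (List Char)) letra =>
        d.modify (pvF p letra) [] (fun xs => xs ++ [letra])) PySem.Dict.empty).getD k []
    = (pvCands p l).filter (fun c => pvF p c == k) := by
  have hm : (pvCands p l).foldl
      (fun (d : PySem.Dict Int (List Char)) letra =>
        d.modify (pvF p letra) [] (fun xs => xs ++ [letra])) PySem.Dict.empty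
    = ((pvCands p l).map (fun c => (pvF p c, c))).foldl
      (fun (d : PySem.Dict Int (List Char)) q =>
        d.modify q.1 [] (fun xs => xs ++ [q.2])) PySem.Dict.empty := by
    rw [List.foldl_map]
  rw [hm, PySem.Dict.getD_foldl_modify_append]
  simp [List.filter_map, List.map_map, Function.comp_def]

-- B rewritten over the candidate list
theorem pvB_as_cands (p l : String) :
    dar_pista_alt p l =
      (match PySem.List.min? (PySem.Set.ofList ((pvCands p l).map (pvF p))) (fun k => k) with
      | none => none
      | some k => ((pvCands p l).filter (fun c => pvF p c == k)).head?.map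
          (fun c => String.ofList [c])) := by
  unfold dar_pista_alt
  dsimp only []
  rw [pvB_fold, pvB_keys]
  cases hm : PySem.List.min? (PySem.Set.ofList ((pvCands p l).map (pvF p))) (fun k => k) with
  | none => rfl
  | some k =>
    dsimp only []
    rw [pvB_getD, pvHeadGet]

-- the two programs agree
theorem pvMain (p l : String) : dar_pista p l = dar_pista_alt p l := by
  rw [pvA_as_cands, pvB_as_cands]
  cases hc : pvCands p l with
  | nil =>
    rw [show PySem.Set.ofList (List.map (pvF p) ([] : List Char)) = [] from rfl]
    rw [(PySem.List.min?_eq_none_iff ([] : List Int) (fun k => k)).2 rfl]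
  | cons c t =>
    obtain ⟨hmin, hhead⟩ := pvFoldlG_min p t c
    set r := t.foldl (pvG p) c with hrdef
    cases hm : PySem.List.min? (PySem.Set.ofList (List.map (pvF p) (c :: t))) (fun k => k) with
    | none =>
      exfalso
      have h0 := (PySem.List.min?_eq_none_iff _ _).1 hm
      have hmem : pvF p c ∈ PySem.Set.ofList (List.map (pvF p) (c :: t)) :=
        (PySem.Set.mem_ofList _ _).2 (List.mem_map_of_mem List.mem_cons_self)
      rw [h0] at hmem
      exact (List.not_mem_nil) hmem
    | some k =>
      have hk1 : k ∈ PySem.Set.ofList (List.map (pvF p) (c :: t)) := PySem.List.min?_mem hm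
      obtain ⟨c₀, hc₀, hkc₀⟩ := List.mem_map.1 ((PySem.Set.mem_ofList _ _).1 hk1)
      have hrmem : r ∈ c :: t := by
        have hfil : r ∈ (c :: t).filter (fun c => pvF p c == pvF p r) := by
          cases hl : (c :: t).filter (fun c => pvF p c == pvF p r) with
          | nil => rw [hl] at hhead; cases hhead
          | cons y ys =>
            rw [hl] at hhead
            simp only [List.head?_cons, Option.some.injEq] at hhead
            rw [← hhead]; exact List.mem_cons_self
        exact (List.mem_filter.1 hfil).1
      have hkr : k = pvF p r := by
        have h1 : k ≤ pvF p r :=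
          PySem.List.min?_isMin hm _ ((PySem.Set.mem_ofList _ _).2 (List.mem_map_of_mem hrmem))
        have h2 : pvF p r ≤ pvF p c₀ := hmin _ hc₀
        omega
      dsimp only []
      rw [hkr, hhead]
      rfl

-- ===== VERDICT (by name: the statement is the Claim_ definition above) =====
theorem dar_pista_spec : Claim_equal_dar_pista := by
  intro p l _
  unfold Spec_dar_pista
  exact pvMain p l
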